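-- pv_equiv track=rewrite | github.com/vatsal22/python_sandbox | test.py | solution
-- ===== SOURCE A (Python) =====
-- def solution(A):
--     """Your solution goes here."""
--     row_smallest_height = [A[0]]
--     num_of_rows = 1
--     for i in range(1, len(A)-1):
--         smallest_row = -1
--         smallest_height = -1
--         iterator = 0
--         for x in row_smallest_height:
--             if A[i] < x and x > smallest_height:
--                 smallest_height = x
--                 smallest_row=iterator
--             iterator+=1
--         if smallest_row == -1:
--             row_smallest_height.append(A[i])
--             num_of_rows+=1
--         else:
--             row_smallest_height[smallest_row] = A[i]
--     return num_of_rows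
-- ===== SOURCE B (Python) =====
-- def solution(A):
--     """Your solution goes here."""
--     # Sorted-list reformulation: keep row heights in ascending order, so the
--     # replaceable row (the tallest one, per A's rule: height > element and > -1)
--     # is always at the end; replace = pop last + ordered insert.
--     heights = [A[0]]  # ascending
--     for a in A[1:-1]:
--         tallest = heights[-1]
--         if tallest > a and tallest > -1:
--             heights.pop()
--         i = 0
--         while i < len(heights) and heights[i] < a:
--             i += 1
--         heights.insert(i, a)
--     return len(heights)
-- ===== Notes on version B (the rewrite author's own statement) =====
-- stated objective: alternative
-- what changed: B keeps the row heights in a sorted list so the replaceable row (the tallest, when it is taller than the element and taller than -1, reproducing A's sentinel rule) is always the last entry, replacing A's inner index-hunting scan over all rows with a pop of the last element plus an ordered insert.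
import Mathlib
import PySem

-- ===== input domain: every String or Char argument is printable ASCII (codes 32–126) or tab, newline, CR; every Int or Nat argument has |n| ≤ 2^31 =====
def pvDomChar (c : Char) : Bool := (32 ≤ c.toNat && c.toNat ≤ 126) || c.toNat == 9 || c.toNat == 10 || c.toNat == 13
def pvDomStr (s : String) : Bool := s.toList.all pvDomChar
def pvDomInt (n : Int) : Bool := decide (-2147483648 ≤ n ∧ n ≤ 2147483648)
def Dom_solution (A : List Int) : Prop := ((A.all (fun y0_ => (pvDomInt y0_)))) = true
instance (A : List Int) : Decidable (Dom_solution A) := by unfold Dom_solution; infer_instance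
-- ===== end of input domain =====

-- B keeps the row heights sorted so the replaceable (tallest) row is last: pop + ordered insert
-- replaces A's inner index-hunting scan; same return value, not measurably faster.

-- ===== PORT A =====
-- literal transliteration of A: outer loop over range(1, len(A)-1), inner scan with
-- (smallest_row, smallest_height, iterator) state; the subscripts are in range on Pre_ (A nonempty).
def solution (A : List Int) : Int :=
  let st := (PySem.List.pyRange 1 ((A.length : Int) - 1) 1).foldl
    (fun (st : List Int × Int) i =>
      let rows := st.1
      let ai := PySem.List.pyGetD A i 0
      let scan := rows.foldl
        (fun (s : Int × Int × Int) x =>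
          if ai < x ∧ s.2.1 < x then (s.2.2, x, s.2.2 + 1)
          else (s.1, s.2.1, s.2.2 + 1))
        (-1, -1, 0)
      if scan.1 = -1 then (rows ++ [ai], st.2 + 1)
      else (rows.set scan.1.toNat ai, st.2))
    ([PySem.List.pyGetD A 0 0], 1)
  st.2

-- ===== PORT B =====
-- B-side helper: the while-loop computing the insertion position in the ascending list.
def findPos (a : Int) : List Int → Nat
  | [] => 0
  | x :: xs => if x < a then findPos a xs + 1 else 0

def solution_alt (A : List Int) : Int :=
  let heights := (PySem.List.slice A (some 1) (some (-1))).foldl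
    (fun (hs : List Int) a =>
      let tallest := PySem.List.pyGetD hs (-1) 0
      let hs' := if tallest > a ∧ tallest > -1 then hs.dropLast else hs
      PySem.List.insert hs' ((findPos a hs' : Nat) : Int) a)
    [PySem.List.pyGetD A 0 0]
  (heights.length : Int)

-- ===== PRECONDITION & SPEC =====
-- Pre_ excludes only the empty list, on which the Python A raises IndexError at its first subscript.
def Pre_solution (A : List Int) : Prop := A ≠ []
instance (A : List Int) : Decidable (Pre_solution A) := by unfold Pre_solution; infer_instance
def pvWitness_solution : List Int := ([3, 1, 4, 1, 5])
def Spec_solution (A : List Int) (out : Int) : Prop := out = solution_alt A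
instance (A : List Int) (out : Int) : Decidable (Spec_solution A out) := by unfold Spec_solution; infer_instance

-- ===== CLAIM (what is proved, stated in full; the proofs are below) =====
def Claim_equal_solution : Prop := ∀ (A : List Int), Dom_solution A → Pre_solution A → Spec_solution A (solution A)

-- ===== LEMMAS AND PROOFS =====

-- proof-only restatements of the two loop bodies
def scanf (a : Int) : Int × Int × Int → Int → Int × Int × Int :=
  fun s x => if a < x ∧ s.2.1 < x then (s.2.2, x, s.2.2 + 1) else (s.1, s.2.1, s.2.2 + 1)

def stepA : List Int × Int → Int → List Int × Int :=
  fun st a =>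
    let rows := st.1
    let scan := rows.foldl (scanf a) (-1, -1, 0)
    if scan.1 = -1 then (rows ++ [a], st.2 + 1) else (rows.set scan.1.toNat a, st.2)

def stepB : List Int → Int → List Int :=
  fun hs a =>
    let tallest := PySem.List.pyGetD hs (-1) 0
    let hs' := if tallest > a ∧ tallest > -1 then hs.dropLast else hs
    PySem.List.insert hs' ((findPos a hs' : Nat) : Int) a

lemma tail_dropLast_eq (A : List Int) :
    (PySem.List.pyRange 1 ((A.length : Int) - 1) 1).map (fun i => PySem.List.pyGetD A i 0)
      = A.tail.dropLast := by
  rw [PySem.List.pyRange_one, List.map_map]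
  apply List.ext_getElem
  · simp only [List.length_map, List.length_range, List.length_dropLast, List.length_tail]
    omega
  · intro i h1 h2
    simp only [List.getElem_map, List.getElem_range, Function.comp]
    have hlen : i < A.length - 2 := by
      simp only [List.length_map, List.length_range] at h1; omega
    rw [List.getElem_dropLast, List.getElem_tail]
    have hc : (1 + (i : Int)) = ((1 + i : Nat) : Int) := by push_cast; ring
    rw [hc, PySem.List.pyGetD_natCast, List.getD_eq_getElem _ _ (by omega)]
    congr 1
    omega

lemma foldl_stepA_map (A : List Int) :
    ∀ (l : List Int) (st : List Int × Int),
      l.foldl (fun st i => stepA st (PySem.List.pyGetD A i 0)) st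
        = (l.map (fun i => PySem.List.pyGetD A i 0)).foldl stepA st := by
  intro l
  induction l with
  | nil => intro st; rfl
  | cons x xs ih => intro st; exact ih _

lemma solution_eq (A : List Int) :
    solution A = ((A.tail.dropLast).foldl stepA ([PySem.List.pyGetD A 0 0], 1)).2 := by
  show ((PySem.List.pyRange 1 ((A.length : Int) - 1) 1).foldl
      (fun st i => stepA st (PySem.List.pyGetD A i 0)) ([PySem.List.pyGetD A 0 0], 1)).2 = _
  rw [foldl_stepA_map, tail_dropLast_eq]

lemma slice_eq (A : List Int) :
    PySem.List.slice A (some 1) (some (-1)) = A.tail.dropLast := by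
  cases A with
  | nil => rfl
  | cons x xs =>
    simp [PySem.List.slice, List.dropLast_eq_take]

lemma solution_alt_eq (A : List Int) :
    solution_alt A = (((A.tail.dropLast).foldl stepB [PySem.List.pyGetD A 0 0]).length : Int) := by
  show (((PySem.List.slice A (some 1) (some (-1))).foldl stepB [PySem.List.pyGetD A 0 0]).length : Int) = _
  rw [slice_eq]

def ScanOK (a : Int) (L : List Int) (r h : Int) : Prop :=
  ((r = -1 ∧ h = -1) ∨
    (∃ j : Nat, r = (j : Int) ∧ j < L.length ∧ L.getD j 0 = h ∧ a < h ∧ -1 < h))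
  ∧ (∀ x ∈ L, a < x → -1 < x → x ≤ h)

lemma scan_go (a : Int) :
    ∀ (l pre : List Int) (r h : Int),
      ScanOK a pre r h →
      ScanOK a (pre ++ l) ((l.foldl (scanf a) (r, h, (pre.length : Int))).1)
        ((l.foldl (scanf a) (r, h, (pre.length : Int))).2.1) := by
  intro l
  induction l with
  | nil => intro pre r h H; simpa using H
  | cons x xs ih =>
    intro pre r h H
    have hm1 : -1 ≤ h := by
      rcases H.1 with ⟨_, hh⟩ | ⟨j, _, _, _, _, hh⟩ <;> omega
    have hfold : (x :: xs).foldl (scanf a) (r, h, (pre.length : Int))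
        = xs.foldl (scanf a) (scanf a (r, h, (pre.length : Int)) x) := rfl
    rw [hfold]
    by_cases hc : a < x ∧ h < x
    · have hstep : scanf a (r, h, (pre.length : Int)) x
          = ((pre.length : Int), x, (((pre ++ [x]).length : Int))) := by
        simp [scanf, hc]
      rw [hstep]
      have hOK : ScanOK a (pre ++ [x]) ((pre.length : Int)) x := by
        refine ⟨Or.inr ⟨pre.length, rfl, by simp, ?_, hc.1, by omega⟩, ?_⟩
        · rw [List.getD_eq_getElem _ _ (by simp), List.getElem_concat_length rfl]
        · intro y hy hya hym
          rcases List.mem_append.1 hy with hyp | hyx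
          · exact le_of_lt (lt_of_le_of_lt (H.2 y hyp hya hym) hc.2)
          · simp at hyx; omega
      have := ih (pre ++ [x]) ((pre.length : Int)) x hOK
      rwa [List.append_cons]
    · have hstep : scanf a (r, h, (pre.length : Int)) x = (r, h, (((pre ++ [x]).length : Int))) := by
        simp [scanf, hc]
      rw [hstep]
      have hOK : ScanOK a (pre ++ [x]) r h := by
        constructor
        · rcases H.1 with h1 | ⟨j, hj1, hj2, hj3, hj4, hj5⟩
          · exact Or.inl h1
          · exact Or.inr ⟨j, hj1, by simp; omega, by rw [List.getD_append _ _ _ _ hj2]; exact hj3, hj4, hj5⟩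
        · intro y hy hya hym
          rcases List.mem_append.1 hy with hyp | hyx
          · exact H.2 y hyp hya hym
          · simp at hyx; subst hyx
            rcases not_and_or.1 hc with h' | h'
            · exact absurd hya h'
            · exact le_of_not_gt h'
      have := ih (pre ++ [x]) r h hOK
      rwa [List.append_cons]

lemma scan_spec (a : Int) (L : List Int) :
    ScanOK a L ((L.foldl (scanf a) (-1, -1, 0)).1) ((L.foldl (scanf a) (-1, -1, 0)).2.1) := by
  have := scan_go a L [] (-1) (-1) ⟨Or.inl ⟨rfl, rfl⟩, by simp⟩
  simpa using this

-- the last element of an ascending list bounds every element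
lemma le_getLast : ∀ (s : List Int) (hs : s ≠ []), s.Pairwise (· ≤ ·) → ∀ x ∈ s, x ≤ s.getLast hs := by
  intro s
  induction s with
  | nil => intro hs; exact absurd rfl hs
  | cons y t ih =>
    intro _ hsort x hx
    cases t with
    | nil => simp at hx; simp [hx]
    | cons z t' =>
      rw [List.getLast_cons (by simp)]
      rcases List.mem_cons.1 hx with hxy | hxt
      · subst hxy
        have hyz : x ≤ z := (List.pairwise_cons.1 hsort).1 z (by simp)
        have := ih (by simp) (List.pairwise_cons.1 hsort).2 z (by simp)
        omega
      · exact ih (by simp) (List.pairwise_cons.1 hsort).2 x hxt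

-- multiset view of Python's  rows[j] = a
lemma coe_set : ∀ (l : List Int) (j : Nat), j < l.length → ∀ a : Int,
    ((l.set j a : List Int) : Multiset Int) = a ::ₘ ((l : Multiset Int).erase (l.getD j 0)) := by
  intro l
  induction l with
  | nil => intro j hj; simp at hj
  | cons x xs ih =>
    intro j hj a
    cases j with
    | zero => simp
    | succ j' =>
      have hj' : j' < xs.length := by simpa using hj
      have hv : xs.getD j' 0 ∈ xs := by
        rw [List.getD_eq_getElem _ _ hj']; exact List.getElem_mem hj'
      simp only [List.set, List.getD_cons_succ]
      by_cases hx : x = xs.getD j' 0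
      · rw [show ((x :: xs.set j' a : List Int) : Multiset Int)
              = x ::ₘ ((xs.set j' a : List Int) : Multiset Int) from rfl,
            ih j' hj' a,
            show ((x :: xs : List Int) : Multiset Int) = x ::ₘ (xs : Multiset Int) from rfl,
            ← hx, Multiset.erase_cons_head, Multiset.cons_swap]
        congr 1
        exact Multiset.cons_erase (by rw [hx]; exact Multiset.mem_coe.2 hv)
      · rw [show ((x :: xs.set j' a : List Int) : Multiset Int)
              = x ::ₘ ((xs.set j' a : List Int) : Multiset Int) from rfl,
            ih j' hj' a,
            show ((x :: xs : List Int) : Multiset Int) = x ::ₘ (xs : Multiset Int) from rfl,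
            Multiset.erase_cons_tail_of_mem (Multiset.mem_coe.2 hv), Multiset.cons_swap]

lemma findPos_le (a : Int) : ∀ s : List Int, findPos a s ≤ s.length := by
  intro s
  induction s with
  | nil => simp [findPos]
  | cons x xs ih =>
    by_cases hx : x < a
    · simp only [findPos, if_pos hx, List.length_cons]; omega
    · simp [findPos, hx]

-- B's while-loop insert is an ordered insert
lemma insert_findPos (a : Int) : ∀ s : List Int,
    PySem.List.insert s ((findPos a s : Nat) : Int) a = List.orderedInsert (· ≤ ·) a s := by
  intro s
  rw [PySem.List.insert_natCast _ _ _ (findPos_le a s)]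
  induction s with
  | nil => rfl
  | cons x xs ih =>
    by_cases hx : x < a
    · simp only [findPos, if_pos hx, List.take_succ_cons, List.drop_succ_cons,
        List.orderedInsert, if_neg (by omega : ¬ a ≤ x), List.cons_append]
      rw [ih]
    · simp only [findPos, if_neg hx, List.take_zero, List.drop_zero, List.nil_append,
        List.orderedInsert, if_pos (by omega : a ≤ x)]

-- one loop iteration preserves the simulation invariant
lemma orderedInsert_ne_nil (a : Int) (s : List Int) : List.orderedInsert (· ≤ ·) a s ≠ [] := by
  intro hnil
  have := (List.perm_orderedInsert (· ≤ ·) a s).length_eq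
  rw [hnil] at this
  simp at this

lemma coe_orderedInsert (a : Int) (s : List Int) :
    ((List.orderedInsert (· ≤ ·) a s : List Int) : Multiset Int) = a ::ₘ (s : Multiset Int) :=
  Multiset.coe_eq_coe.2 (List.perm_orderedInsert (· ≤ ·) a s)

lemma step_equiv (a : Int) (L S : List Int) (n : Int)
    (hSne : S ≠ []) (hsort : S.Pairwise (· ≤ ·))
    (hms : (S : Multiset Int) = (L : Multiset Int)) (hn : n = (L.length : Int)) :
    stepB S a ≠ [] ∧ (stepB S a).Pairwise (· ≤ ·) ∧
      ((stepB S a : List Int) : Multiset Int) = (((stepA (L, n) a).1 : List Int) : Multiset Int) ∧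
      (stepA (L, n) a).2 = (((stepA (L, n) a).1).length : Int) := by
  have hmem : ∀ x : Int, x ∈ S ↔ x ∈ L := by
    intro x
    exact (Multiset.coe_eq_coe.1 hms).mem_iff
  have hM : PySem.List.pyGetD S (-1) 0 = S.getLast hSne := PySem.List.pyGetD_neg_one (xs := S) 0 hSne
  have hMmax : ∀ x ∈ S, x ≤ S.getLast hSne := le_getLast S hSne hsort
  have hScan := scan_spec a L
  set r := (L.foldl (scanf a) (-1, -1, 0)).1 with hr_def
  set h := (L.foldl (scanf a) (-1, -1, 0)).2.1 with hh_def
  by_cases hr : r = -1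
  · -- no qualifying row: A appends, B inserts without popping
    have hA : stepA (L, n) a = (L ++ [a], n + 1) := by
      simp [stepA, ← hr_def, hr]
    have hh1 : h = -1 := by
      rcases hScan.1 with ⟨_, hh⟩ | ⟨j, hj1, _, _, _, _⟩
      · exact hh
      · rw [hj1] at hr; omega
    have hnoq : ¬ (PySem.List.pyGetD S (-1) 0 > a ∧ PySem.List.pyGetD S (-1) 0 > -1) := by
      rw [hM]
      rintro ⟨hMa, hMm⟩
      have := hScan.2 (S.getLast hSne) ((hmem _).1 (List.getLast_mem hSne)) hMa hMm
      omega
    have hB : stepB S a = List.orderedInsert (· ≤ ·) a S := by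
      simp only [stepB, if_neg hnoq]
      exact insert_findPos a S
    refine ⟨?_, ?_, ?_, ?_⟩
    · rw [hB]; exact orderedInsert_ne_nil a S
    · rw [hB]; exact List.Pairwise.orderedInsert a S hsort
    · rw [hB, hA, coe_orderedInsert]
      rw [hms]
      exact Multiset.coe_eq_coe.2 (List.perm_append_singleton a L).symm
    · rw [hA]; simp [hn]
  · -- a qualifying row exists: A overwrites the tallest one, B pops the last and reinserts
    obtain ⟨j, hj1, hj2, hj3, hja, hjm⟩ :
        ∃ j : Nat, r = (j : Int) ∧ j < L.length ∧ L.getD j 0 = h ∧ a < h ∧ -1 < h := by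
      rcases hScan.1 with ⟨h1, _⟩ | hex
      · exact absurd h1 hr
      · exact hex
    have hA : stepA (L, n) a = (L.set j a, n) := by
      simp only [stepA, ← hr_def, hj1, Int.toNat_natCast]
      rw [if_neg (by omega : ¬ ((j : Int) = -1))]
    have hhL : h ∈ L := by
      rw [← hj3, List.getD_eq_getElem _ _ hj2]
      exact List.getElem_mem hj2
    have hhM : h = S.getLast hSne := by
      have h1 : h ≤ S.getLast hSne := hMmax h ((hmem h).2 hhL)
      have h2 : S.getLast hSne ≤ h := by
        have hMa : a < S.getLast hSne := lt_of_lt_of_le hja h1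
        have hMm : (-1 : Int) < S.getLast hSne := lt_of_lt_of_le hjm h1
        exact hScan.2 (S.getLast hSne) ((hmem _).1 (List.getLast_mem hSne)) hMa hMm
      omega
    have hcond : PySem.List.pyGetD S (-1) 0 > a ∧ PySem.List.pyGetD S (-1) 0 > -1 := by
      rw [hM, ← hhM]; exact ⟨hja, hjm⟩
    have hB : stepB S a = List.orderedInsert (· ≤ ·) a S.dropLast := by
      simp only [stepB, if_pos hcond]
      exact insert_findPos a S.dropLast
    have hcoeS : (S : Multiset Int) = S.getLast hSne ::ₘ (S.dropLast : Multiset Int) := by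
      apply Multiset.coe_eq_coe.2
      conv_lhs => rw [← List.dropLast_append_getLast hSne]
      exact List.perm_append_singleton _ _
    refine ⟨?_, ?_, ?_, ?_⟩
    · rw [hB]; exact orderedInsert_ne_nil a S.dropLast
    · rw [hB]
      exact List.Pairwise.orderedInsert a S.dropLast (List.Pairwise.sublist (List.dropLast_sublist S) hsort)
    · rw [hB, hA, coe_orderedInsert, coe_set L j hj2 a, hj3]
      congr 1
      rw [← hms, hhM, hcoeS, Multiset.erase_cons_head]
    · rw [hA]; simp [hn]

lemma fold_equiv : ∀ (xs L S : List Int) (n : Int),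
    S ≠ [] → S.Pairwise (· ≤ ·) → (S : Multiset Int) = (L : Multiset Int) → n = (L.length : Int) →
    (xs.foldl stepA (L, n)).2 = ((xs.foldl stepB S).length : Int) := by
  intro xs
  induction xs with
  | nil =>
    intro L S n _ _ hms hn
    have : S.length = L.length := by
      have := congrArg Multiset.card hms
      simpa using this
    simp [hn, this]
  | cons a xs ih =>
    intro L S n hSne hsort hms hn
    obtain ⟨h1, h2, h3, h4⟩ := step_equiv a L S n hSne hsort hms hn
    exact ih (stepA (L, n) a).1 (stepB S a) (stepA (L, n) a).2 h1 h2 h3 h4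

theorem solution_spec' : ∀ (A : List Int), Pre_solution A → solution A = solution_alt A := by
  intro A hpre
  rw [solution_eq, solution_alt_eq]
  exact fold_equiv A.tail.dropLast [PySem.List.pyGetD A 0 0] [PySem.List.pyGetD A 0 0] 1
    (by simp) (by simp) rfl (by simp)

-- ===== VERDICT (by name: the statement is the Claim_ definition above) =====
theorem solution_spec : Claim_equal_solution := by
  intro A _ hpre; exact solution_spec' A hpre
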